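-- pv_equiv track=rewrite | github.com/ginsonko/Artificial-PsyArch | hdb/_stimulus_retrieval.py | _subtract_tokens_preserve_order
-- ===== SOURCE A (Python) =====
-- from collections import Counter
--
-- def _subtract_tokens_preserve_order(tokens: list[str], tokens_to_remove: list[str]) -> list[str]:
--     remove_counter = Counter(str(token) for token in tokens_to_remove if str(token))
--     residual = []
--     for token in tokens:
--         text = str(token)
--         if remove_counter.get(text, 0) > 0:
--             remove_counter[text] -= 1
--             continue
--         residual.append(text)
--     return residual
-- ===== SOURCE B (Python) =====
-- def _subtract_tokens_preserve_order(tokens: list[str], tokens_to_remove: list[str]) -> list[str]: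
--     texts = [str(t) for t in tokens]
--     for r in tokens_to_remove:
--         rs = str(r)
--         if not rs:
--             continue
--         try:
--             texts.remove(rs)
--         except ValueError:
--             pass
--     return texts
-- ===== Notes on version B (the rewrite author's own statement) =====
-- stated objective: simpler
-- what changed: Replaces the Counter-based single counting pass with a direct loop that calls list.remove for each non-empty requested token (ignoring ValueError), removing the earliest occurrence each time.
import Mathlib
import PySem

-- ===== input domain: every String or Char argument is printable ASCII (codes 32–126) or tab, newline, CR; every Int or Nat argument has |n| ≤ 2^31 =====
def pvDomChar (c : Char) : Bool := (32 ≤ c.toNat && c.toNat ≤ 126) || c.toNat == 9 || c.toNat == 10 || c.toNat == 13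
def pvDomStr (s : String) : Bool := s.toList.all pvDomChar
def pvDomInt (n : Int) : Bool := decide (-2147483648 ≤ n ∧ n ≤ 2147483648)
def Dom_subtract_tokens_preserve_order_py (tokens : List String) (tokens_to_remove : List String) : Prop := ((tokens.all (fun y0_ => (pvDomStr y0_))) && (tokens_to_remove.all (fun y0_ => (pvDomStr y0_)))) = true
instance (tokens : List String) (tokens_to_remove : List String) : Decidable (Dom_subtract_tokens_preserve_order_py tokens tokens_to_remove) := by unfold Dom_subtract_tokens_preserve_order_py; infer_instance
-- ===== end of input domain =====

-- B replaces A's Counter-based counting pass with a direct loop calling list.remove for each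
-- non-empty requested token (ignoring ValueError); objective: simpler (no speed claim).

-- ===== PORT A =====
-- Counter(str(token) for token in tokens_to_remove if str(token)); str is the identity on str inputs.
def subtract_tokens_preserve_order_py (tokens : List String) (tokens_to_remove : List String) : List String :=
  let remove_counter : PySem.Dict String Int :=
    PySem.Dict.counter (tokens_to_remove.filter (fun t => t ≠ ""))
  (tokens.foldl
    (fun (st : PySem.Dict String Int × List String) token =>
      if st.1.getD token 0 > 0 then
        (st.1.modify token 0 (· - 1), st.2)
      else
        (st.1, st.2 ++ [token]))
    (remove_counter, [])).2

-- ===== PORT B =====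
def subtract_tokens_preserve_order_py_alt (tokens : List String) (tokens_to_remove : List String) : List String :=
  tokens_to_remove.foldl
    (fun texts r =>
      if r = "" then texts
      else
        match PySem.List.remove? texts r with  -- texts.remove(r); ValueError (none) ignored
        | none => texts
        | some texts' => texts')
    tokens

-- ===== PRECONDITION & SPEC =====
def Spec_subtract_tokens_preserve_order_py (tokens : List String) (tokens_to_remove : List String) (out : List String) : Prop := out = subtract_tokens_preserve_order_py_alt tokens tokens_to_remove
instance (tokens : List String) (tokens_to_remove : List String) (out : List String) : Decidable (Spec_subtract_tokens_preserve_order_py tokens tokens_to_remove out) := by unfold Spec_subtract_tokens_preserve_order_py; infer_instance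

-- ===== CLAIM (what is proved, stated in full; the proofs are below) =====
def Claim_equal_subtract_tokens_preserve_order_py : Prop := ∀ (tokens : List String) (tokens_to_remove : List String), Dom_subtract_tokens_preserve_order_py tokens tokens_to_remove → Spec_subtract_tokens_preserve_order_py tokens tokens_to_remove (subtract_tokens_preserve_order_py tokens tokens_to_remove)

-- ===== LEMMAS AND PROOFS =====

-- Abstract "drop the first (f v) occurrences of each v" function.
def pvDropF : List String → (String → Int) → List String
  | [], _ => []
  | t :: ts, f =>
    if f t > 0 then pvDropF ts (fun v => if v = t then f v - 1 else f v)
    else t :: pvDropF ts f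

-- One list.remove step of B.
def pvRem1 (texts : List String) (r : String) : List String :=
  match PySem.List.remove? texts r with
  | none => texts
  | some texts' => texts'

theorem pvRem1_cons_of_ne (t : String) (ts : List String) (r : String) (h : t ≠ r) :
    pvRem1 (t :: ts) r = t :: pvRem1 ts r := by
  unfold pvRem1
  rw [PySem.List.remove?_cons_of_ne ts h]
  cases PySem.List.remove? ts r <;> rfl

-- A's loop computes acc ++ pvDropF tokens (counter lookup).
theorem pvA_loop (tokens : List String) (c : PySem.Dict String Int) (acc : List String) :
    (tokens.foldl
      (fun (st : PySem.Dict String Int × List String) token =>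
        if st.1.getD token 0 > 0 then
          (st.1.modify token 0 (· - 1), st.2)
        else
          (st.1, st.2 ++ [token]))
      (c, acc)).2 = acc ++ pvDropF tokens (fun v => c.getD v 0) := by
  induction tokens generalizing c acc with
  | nil => simp [pvDropF]
  | cons t ts ih =>
    simp only [List.foldl_cons, pvDropF]
    by_cases h : c.getD t 0 > 0
    · rw [if_pos h, if_pos h, ih]
      congr 2
      funext v
      rw [PySem.Dict.getD_modify]
      by_cases hv : v = t
      · subst hv; simp
      · simp [hv]
    · rw [if_neg h, if_neg h, ih]
      simp

-- Key lemma: one extra request for r (bump) = removing the first occurrence of r first.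
theorem pvDropF_bump (tokens : List String) (f : String → Int) (r : String)
    (hnn : ∀ v, 0 ≤ f v) :
    pvDropF tokens (fun v => if v = r then f v + 1 else f v) = pvDropF (pvRem1 tokens r) f := by
  induction tokens generalizing f with
  | nil => rfl
  | cons t ts ih =>
    by_cases ht : t = r
    · subst ht
      simp only [pvDropF, pvRem1, PySem.List.remove?_cons_self, if_true]
      rw [if_pos (show f t + 1 > 0 by have := hnn t; omega)]
      have hfun : (fun v => if v = t then (if v = t then f v + 1 else f v) - 1
                    else if v = t then f v + 1 else f v) = f := by
        funext v
        by_cases hv : v = t <;> simp [hv]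
      rw [hfun]
    · rw [pvRem1_cons_of_ne t ts r ht]
      simp only [pvDropF]
      by_cases hft : f t > 0
      · rw [if_pos (show (if t = r then f t + 1 else f t) > 0 by simp [ht]; omega),
            if_pos hft]
        have hfun : (fun v => if v = t then (if v = r then f v + 1 else f v) - 1
                      else if v = r then f v + 1 else f v)
            = (fun v => if v = r then (if v = t then f v - 1 else f v) + 1
                      else if v = t then f v - 1 else f v) := by
          funext v
          by_cases hv : v = t <;> by_cases hvr : v = r <;> simp_all
        rw [hfun]
        have hdec : ∀ v, 0 ≤ (fun w => if w = t then f w - 1 else f w) v := by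
          intro v
          dsimp only
          by_cases hv : v = t
          · subst hv; simp; omega
          · simp [hv]; exact hnn v
        exact ih _ hdec
      · rw [if_neg (show ¬ (if t = r then f t + 1 else f t) > 0 by simp [ht]; omega),
            if_neg hft]
        rw [ih f hnn]

-- B's fold = pvDropF with the (empty-filtered) request counts.
theorem pvB_eq_dropF (R tokens : List String) :
    R.foldl
      (fun texts r =>
        if r = "" then texts
        else
          match PySem.List.remove? texts r with
          | none => texts
          | some texts' => texts') tokens
    = pvDropF tokens (fun v => ((R.filter (fun t => t ≠ "")).count v : Int)) := by
  induction R generalizing tokens with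
  | nil =>
    rw [List.foldl_nil]
    induction tokens with
    | nil => rfl
    | cons t ts ihts =>
      simp only [pvDropF]
      rw [if_neg (by simp)]
      exact congrArg (t :: ·) ihts
  | cons r R ih =>
    by_cases hr : r = ""
    · subst hr
      have hfil : List.filter (fun t => t ≠ "") ("" :: R) = List.filter (fun t => t ≠ "") R := by
        simp
      simp only [List.foldl_cons, if_true]
      rw [ih, hfil]
    · simp only [List.foldl_cons]
      rw [if_neg hr]
      have hB : (match PySem.List.remove? tokens r with
                 | none => tokens
                 | some texts' => texts') = pvRem1 tokens r := rfl
      rw [hB, ih]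
      have hcnt : (fun v => (((r :: R).filter (fun t => t ≠ "")).count v : Int))
           = (fun v => if v = r then ((R.filter (fun t => t ≠ "")).count v : Int) + 1
               else ((R.filter (fun t => t ≠ "")).count v : Int)) := by
        funext v
        by_cases hv : v = r
        · subst hv; simp [hr]
        · simp [hr, hv, Ne.symm hv]
      rw [hcnt]
      exact (pvDropF_bump tokens _ r (fun v => Int.natCast_nonneg _)).symm

-- ===== VERDICT (by name: the statement is the Claim_ definition above) =====
theorem subtract_tokens_preserve_order_py_spec : Claim_equal_subtract_tokens_preserve_order_py := by
  intro tokens tokens_to_remove _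
  unfold Spec_subtract_tokens_preserve_order_py
  unfold subtract_tokens_preserve_order_py subtract_tokens_preserve_order_py_alt
  rw [pvA_loop, pvB_eq_dropF, List.nil_append]
  congr 1
  funext v
  exact PySem.Dict.getD_counter _ _
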